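-- pv_equiv track=rewrite | github.com/UpMortem/accounting | process.py | find_category
-- ===== SOURCE A (Python) =====
-- def find_category(description, mappings):
--     max_len = 0
--     category = 'Ask My Accountant'
--     for k, v in mappings.items():
--         if k in description and len(k) > max_len:
--             max_len = len(k)
--             category = v
--     return category
-- ===== SOURCE B (Python) =====
-- def find_category(description, mappings):
--     # Longest-match wins: try keys longest-first (stable sort keeps insertion
--     # order among equal lengths, matching dict iteration tie-breaking) and
--     # return at the first hit; empty keys trivially match and are skipped.
--     for k, v in sorted(mappings.items(), key=lambda kv: len(kv[0]), reverse=True):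
--         if k and k in description:
--             return v
--     return 'Ask My Accountant'
-- ===== Notes on version B (the rewrite author's own statement) =====
-- stated objective: alternative
-- what changed: Replaces A's single-pass running-max accumulator with a stable sort of the items by key length (descending) followed by a scan that returns at the first non-empty key contained in the description, so the substring tests stop at the first (longest) hit instead of testing every key.
import Mathlib
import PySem

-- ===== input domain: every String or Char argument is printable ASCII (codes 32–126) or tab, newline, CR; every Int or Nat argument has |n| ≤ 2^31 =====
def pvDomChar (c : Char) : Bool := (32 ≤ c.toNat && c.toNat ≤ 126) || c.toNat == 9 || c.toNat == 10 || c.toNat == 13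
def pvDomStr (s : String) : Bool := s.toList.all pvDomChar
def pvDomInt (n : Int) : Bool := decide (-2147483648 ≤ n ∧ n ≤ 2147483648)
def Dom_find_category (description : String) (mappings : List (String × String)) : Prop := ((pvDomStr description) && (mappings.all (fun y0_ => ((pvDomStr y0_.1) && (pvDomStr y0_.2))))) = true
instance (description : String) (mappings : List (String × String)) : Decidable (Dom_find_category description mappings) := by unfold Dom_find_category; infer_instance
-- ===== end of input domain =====

-- B replaces A's running-max accumulator loop by a stable sort of the items by key length (descending) followed by a first-match scan with early exit; alternative algorithm, same cost class.


-- ===== PORT A =====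
-- for k, v in mappings.items(): if k in description and len(k) > max_len: update (max_len, category)
def find_category (description : String) (mappings : List (String × String)) : String :=
  (((PySem.Dict.ofList mappings).items).foldl
    (fun (st : Int × String) kv =>
      if PySem.Str.isIn kv.1 description && decide (PySem.Str.len kv.1 > st.1) then
        (PySem.Str.len kv.1, kv.2)
      else st)
    (0, "Ask My Accountant")).2

-- ===== PORT B =====
-- the for-loop body with early return: first (k, v) in the sorted list with k nonempty and k in description
def fc_scan (description : String) : List (String × String) → String
  | [] => "Ask My Accountant"
  | kv :: rest =>
      if !(kv.1 == "") && PySem.Str.isIn kv.1 description then kv.2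
      else fc_scan description rest

-- for k, v in sorted(mappings.items(), key=lambda kv: len(kv[0]), reverse=True): if k and k in description: return v
def find_category_alt (description : String) (mappings : List (String × String)) : String :=
  fc_scan description
    (PySem.List.sorted ((PySem.Dict.ofList mappings).items) (fun kv => PySem.Str.len kv.1) true)

-- ===== PRECONDITION & SPEC =====
def Spec_find_category (description : String) (mappings : List (String × String)) (out : String) : Prop := out = find_category_alt description mappings
instance (description : String) (mappings : List (String × String)) (out : String) : Decidable (Spec_find_category description mappings out) := by unfold Spec_find_category; infer_instance

-- ===== CLAIM (what is proved, stated in full; the proofs are below) =====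
def Claim_equal_find_category : Prop := ∀ (description : String) (mappings : List (String × String)), Dom_find_category description mappings → Spec_find_category description mappings (find_category description mappings)

-- ===== LEMMAS AND PROOFS =====


-- max? (x :: s) is the running max started at x
theorem pv_max?_cons {α : Type} (key : α → Int) (x : α) (s : List α) :
    PySem.List.max? (x :: s) key =
      some (s.foldl (fun m y => if key m < key y then y else m) x) := by
  show List.foldl _ (some x) s = _
  induction s generalizing x with
  | nil => rfl
  | cons y t ih =>
      simp only [List.foldl_cons]
      split <;> exact ih _

-- starting the running max at x versus taking max? of s
theorem pv_foldl_start {α : Type} (key : α → Int) (s : List α) (x : α) :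
    s.foldl (fun m y => if key m < key y then y else m) x =
      match PySem.List.max? s key with
      | none => x
      | some kv => if key x < key kv then kv else x := by
  induction s generalizing x with
  | nil => rfl
  | cons y t ih =>
      simp only [List.foldl_cons]
      rw [pv_max?_cons, ih (if key x < key y then y else x), ih y]
      cases h : PySem.List.max? t key with
      | none => dsimp only
      | some kv =>
          dsimp only
          split_ifs <;> first | rfl | omega

-- A's running-max fold from (m, c), 0 ≤ m, equals filter-then-(first) max? of the items
theorem pv_fold_eq (description : String) (l : List (String × String))
    (m : Int) (hm : 0 ≤ m) (c : String) :
    (l.foldl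
      (fun (st : Int × String) kv =>
        if PySem.Str.isIn kv.1 description && decide (PySem.Str.len kv.1 > st.1) then
          (PySem.Str.len kv.1, kv.2)
        else st)
      (m, c)).2 =
    match PySem.List.max?
        (l.filter (fun kv => !(kv.1 == "") && PySem.Str.isIn kv.1 description))
        (fun kv => PySem.Str.len kv.1) with
    | none => c
    | some kv => if m < PySem.Str.len kv.1 then kv.2 else c := by
  induction l generalizing m c with
  | nil => rfl
  | cons x t ih =>
      by_cases hin : PySem.Str.isIn x.1 description = true
      · by_cases hgt : m < PySem.Str.len x.1
        · have hx0 : (0 : Int) < PySem.Str.len x.1 := lt_of_le_of_lt hm hgt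
          have hne : x.1 ≠ "" := by
            intro hc
            rw [hc] at hx0
            exact absurd hx0 (by decide)
          have hneb : (x.1 == "") = false := beq_eq_false_iff_ne.2 hne
          simp only [List.foldl_cons, List.filter_cons, hin, hneb, Bool.not_false,
            Bool.and_true, if_true]
          rw [if_pos (by simp only [Bool.true_and, decide_eq_true_eq]; exact hgt)]
          rw [ih _ (le_of_lt hx0)]
          rw [pv_max?_cons, pv_foldl_start]
          cases h : PySem.List.max?
              (t.filter (fun kv => !(kv.1 == "") && PySem.Str.isIn kv.1 description))
              (fun kv => PySem.Str.len kv.1) with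
          | none =>
              dsimp only
              rw [if_pos hgt]
          | some kv =>
              dsimp only
              by_cases h2 : PySem.Str.len x.1 < PySem.Str.len kv.1
              · rw [if_pos h2, if_pos h2, if_pos (lt_trans hgt h2)]
              · rw [if_neg h2, if_neg h2, if_pos hgt]
        · simp only [List.foldl_cons]
          have hcond : ¬ (PySem.Str.isIn x.1 description && decide (PySem.Str.len x.1 > m)) = true := by
            simp only [hin, Bool.true_and, decide_eq_true_eq, gt_iff_lt]
            exact hgt
          rw [if_neg hcond, ih _ hm c]
          by_cases hne : (x.1 == "") = true
          · simp only [List.filter_cons, hne, Bool.not_true, Bool.false_and]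
            rfl
          · have hneb : (x.1 == "") = false := by
              cases hb : x.1 == "" with
              | true => exact absurd hb hne
              | false => rfl
            simp only [List.filter_cons, hin, hneb, Bool.not_false,
              Bool.and_true, if_true]
            rw [pv_max?_cons, pv_foldl_start]
            cases h : PySem.List.max?
                (t.filter (fun kv => !(kv.1 == "") && PySem.Str.isIn kv.1 description))
                (fun kv => PySem.Str.len kv.1) with
            | none =>
                dsimp only
                rw [if_neg hgt]
            | some kv =>
                dsimp only
                by_cases h2 : PySem.Str.len x.1 < PySem.Str.len kv.1
                · rw [if_pos h2]
                · rw [if_neg h2]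
                  have hk : ¬ m < PySem.Str.len kv.1 := by omega
                  rw [if_neg hgt, if_neg hk]
      · have hinb : PySem.Str.isIn x.1 description = false := by
          cases hb : PySem.Str.isIn x.1 description with
          | true => exact absurd hb hin
          | false => rfl
        simp only [List.foldl_cons, List.filter_cons, hinb, Bool.and_false,
          Bool.false_and]
        exact ih m hm c

-- a nonempty string key has positive Python length
theorem pv_len_pos_of_ne {k : String} (h : k ≠ "") : 0 < PySem.Str.len k := by
  simp only [PySem.Str.len_eq]
  have hl : k.toList ≠ [] := by
    intro hc
    apply h
    have := congrArg String.ofList hc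
    simpa using this
  have : 0 < k.toList.length := List.length_pos_iff.2 hl
  omega

-- find? over an insertion into a descending-sorted list
theorem pv_find?_insertBy {α : Type} (key : α → Int) (pred : α → Bool) (x : α) (s : List α)
    (hs : s.Pairwise (fun a b => key b ≤ key a)) :
    (PySem.List.insertBy (fun a b => decide (key b < key a)) x s).find? pred =
      match s.find? pred with
      | some m => if pred x && decide (key m < key x) then some x else some m
      | none => if pred x then some x else none := by
  induction s with
  | nil => simp [PySem.List.insertBy]
  | cons y ys ih =>
      have hys : ys.Pairwise (fun a b => key b ≤ key a) := hs.tail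
      have hy : ∀ m ∈ y :: ys, key m ≤ key y := by
        intro m hm
        rcases List.mem_cons.1 hm with h | h
        · exact le_of_eq (congrArg key h)
        · exact List.rel_of_pairwise_cons hs h
      by_cases hlt : key y < key x
      · rw [show PySem.List.insertBy (fun a b => decide (key b < key a)) x (y :: ys)
            = x :: y :: ys by simp [PySem.List.insertBy, hlt]]
        cases hf : (y :: ys).find? pred with
        | none =>
            cases hpx : pred x <;> simp [hpx, hf]
        | some m =>
            have hm : key m < key x :=
              lt_of_le_of_lt (hy m (List.mem_of_find?_eq_some hf)) hlt
            cases hpx : pred x <;> simp [hpx, hm, hf]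
      · rw [show PySem.List.insertBy (fun a b => decide (key b < key a)) x (y :: ys)
            = y :: PySem.List.insertBy (fun a b => decide (key b < key a)) x ys by
              simp [PySem.List.insertBy, hlt]]
        rw [List.find?_cons, List.find?_cons]
        cases hpy : pred y with
        | true =>
            dsimp only
            simp [hlt]
        | false =>
            dsimp only
            exact ih hys

-- max? of l ++ [x] is one strict-update step on max? l
theorem pv_max?_append_singleton {α : Type} (key : α → Int) (l : List α) (x : α) :
    PySem.List.max? (l ++ [x]) key =
      match PySem.List.max? l key with
      | none => some x
      | some m => if key m < key x then some x else some m := by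
  unfold PySem.List.max?
  rw [List.foldl_append]
  generalize (List.foldl
      (fun acc x =>
        match acc with
        | none => some x
        | some m => if key m < key x then some x else some m)
      (none : Option α) l) = acc
  cases acc <;> rfl

-- first match in the descending stable sort = first extremal element of the filtered list
theorem pv_find_sorted_eq_max_filter {α : Type} (key : α → Int) (pred : α → Bool) (l : List α) :
    (PySem.List.sorted l key true).find? pred =
      PySem.List.max? (l.filter pred) key := by
  induction l using List.reverseRecOn with
  | nil => rfl
  | append_singleton t x ih =>
      have hstep : PySem.List.sorted (t ++ [x]) key true
          = PySem.List.insertBy (fun a b => decide (key b < key a)) x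
              (PySem.List.sorted t key true) := by
        rw [PySem.List.sorted_rev_eq_foldl_insertBy, PySem.List.sorted_rev_eq_foldl_insertBy,
          List.foldl_append]
        rfl
      rw [hstep,
        pv_find?_insertBy key pred x _ (PySem.List.sorted_pairwise_rev t key),
        ih, List.filter_append]
      cases hpx : pred x with
      | true =>
          rw [show List.filter pred [x] = [x] by simp [hpx], pv_max?_append_singleton]
          cases PySem.List.max? (t.filter pred) key <;> simp
      | false =>
          rw [show List.filter pred [x] = [] by simp [hpx], List.append_nil]
          cases PySem.List.max? (t.filter pred) key <;> simp

-- fc_scan is find? followed by projection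
theorem pv_fc_scan_eq_find? (description : String) (s : List (String × String)) :
    fc_scan description s =
      match s.find? (fun kv => !(kv.1 == "") && PySem.Str.isIn kv.1 description) with
      | none => "Ask My Accountant"
      | some kv => kv.2 := by
  induction s with
  | nil => rfl
  | cons kv rest ih =>
      simp only [fc_scan, List.find?_cons]
      cases h : !(kv.1 == "") && PySem.Str.isIn kv.1 description with
      | true => simp
      | false => simp [ih]

-- ===== VERDICT (by name: the statement is the Claim_ definition above) =====
theorem find_category_spec : Claim_equal_find_category := by
  intro description mappings _
  show find_category description mappings = find_category_alt description mappings
  unfold find_category find_category_alt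
  rw [pv_fold_eq description _ 0 le_rfl, pv_fc_scan_eq_find?,
    pv_find_sorted_eq_max_filter]
  cases h : PySem.List.max?
      (((PySem.Dict.ofList mappings).items).filter
        (fun kv => !(kv.1 == "") && PySem.Str.isIn kv.1 description))
      (fun kv => PySem.Str.len kv.1) with
  | none => rfl
  | some kv =>
      have hmem := PySem.List.max?_mem h
      have hne : kv.1 ≠ "" := by
        have hf := List.of_mem_filter hmem
        simp only [Bool.and_eq_true, Bool.not_eq_true'] at hf
        exact fun hc => by simp [hc] at hf
      dsimp only
      rw [if_pos (pv_len_pos_of_ne hne)]
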